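-- pv_equiv track=rewrite | github.com/Cow-Kite/PS | 프로그래머스/1/42862. 체육복/체육복.py | solution
-- ===== SOURCE A (Python) =====
-- def solution(n, lost, reserve):
--     lost_set = set(lost) - set(reserve)
--     reserve = set(reserve) - set(lost)
--
--     for num in sorted(reserve):
--         if num-1 in lost_set:
--             lost_set.remove(num-1)
--         elif num+1 in lost_set:
--             lost_set.remove(num+1)
--
--     return n - len(lost_set)
-- ===== SOURCE B (Python) =====
-- def solution(n, lost, reserve):
--     # One merge-pass over the sorted union of the deduplicated lost/reserve
--     # students, pairing each student with an adjacent opposite-kind neighbor.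
--     L = set(lost) - set(reserve)
--     R = set(reserve) - set(lost)
--     matched = 0
--     prev = None  # last seen still-unmatched student: (value, is_lost)
--     for v in sorted(L | R):
--         is_lost = v in L
--         if prev is not None and prev[0] == v - 1 and prev[1] != is_lost:
--             matched += 1
--             prev = None
--         else:
--             prev = (v, is_lost)
--     return n - (len(L) - matched)
-- ===== Notes on version B (the rewrite author's own statement) =====
-- stated objective: alternative
-- what changed: Replaces A's loop over sorted(reserve) with membership tests and removals on a mutable lost-set by a single merge-pass over the sorted union of both deduplicated sets that pairs adjacent opposite-kind students with a one-element carry state and counts matches.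
import Mathlib
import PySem

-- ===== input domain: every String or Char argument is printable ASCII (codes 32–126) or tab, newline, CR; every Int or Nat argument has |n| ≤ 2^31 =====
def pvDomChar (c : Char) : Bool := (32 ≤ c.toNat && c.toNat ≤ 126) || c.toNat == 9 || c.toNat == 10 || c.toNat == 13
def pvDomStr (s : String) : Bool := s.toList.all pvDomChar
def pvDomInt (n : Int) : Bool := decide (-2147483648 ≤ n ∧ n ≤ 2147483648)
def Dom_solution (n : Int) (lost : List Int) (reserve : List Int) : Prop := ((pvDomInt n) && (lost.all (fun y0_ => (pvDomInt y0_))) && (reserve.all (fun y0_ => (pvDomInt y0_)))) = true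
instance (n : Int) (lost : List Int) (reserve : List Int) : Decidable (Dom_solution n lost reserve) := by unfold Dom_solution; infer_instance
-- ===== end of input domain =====

-- B replaces A's greedy over sorted(reserve) with membership tests and removals on a
-- mutable lost-set by a single merge-pass over the sorted union of both deduplicated
-- sets, pairing adjacent opposite-kind students with a one-element carry (alternative decomposition).

-- ===== PORT A =====
-- loop body of A's for-loop (the guarded set.remove is exact as discard: the element is present)
def gymStepA (s : PySem.Set Int) (num : Int) : PySem.Set Int :=
  if PySem.Set.contains s (num - 1) then PySem.Set.discard s (num - 1)
  else if PySem.Set.contains s (num + 1) then PySem.Set.discard s (num + 1)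
  else s

def solution (n : Int) (lost : List Int) (reserve : List Int) : Int :=
  let lostSet : PySem.Set Int := PySem.Set.diff (PySem.Set.ofList lost) (PySem.Set.ofList reserve)
  let reserveSet : PySem.Set Int := PySem.Set.diff (PySem.Set.ofList reserve) (PySem.Set.ofList lost)
  n - PySem.Set.len ((PySem.List.sorted reserveSet (fun x => x) false).foldl gymStepA lostSet)

-- ===== PORT B =====
-- loop body of B's for-loop: state = (matched, prev)
def gymStepB (L : PySem.Set Int) (st : Int × Option (Int × Bool)) (v : Int) : Int × Option (Int × Bool) :=
  let isLost := PySem.Set.contains L v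
  match st.2 with
  | some pt => if pt.1 == v - 1 && pt.2 != isLost then (st.1 + 1, none) else (st.1, some (v, isLost))
  | none => (st.1, some (v, isLost))

def solution_alt (n : Int) (lost : List Int) (reserve : List Int) : Int :=
  let L : PySem.Set Int := PySem.Set.diff (PySem.Set.ofList lost) (PySem.Set.ofList reserve)
  let R : PySem.Set Int := PySem.Set.diff (PySem.Set.ofList reserve) (PySem.Set.ofList lost)
  let fin := (PySem.List.sorted (PySem.Set.union L R) (fun x => x) false).foldl
      (gymStepB L) ((0 : Int), (none : Option (Int × Bool)))
  n - (PySem.Set.len L - fin.1)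

-- ===== PRECONDITION & SPEC =====
def Spec_solution (n : Int) (lost : List Int) (reserve : List Int) (out : Int) : Prop := out = solution_alt n lost reserve
instance (n : Int) (lost : List Int) (reserve : List Int) (out : Int) : Decidable (Spec_solution n lost reserve out) := by unfold Spec_solution; infer_instance

-- ===== CLAIM (what is proved, stated in full; the proofs are below) =====
def Claim_equal_solution : Prop := ∀ (n : Int) (lost : List Int) (reserve : List Int), Dom_solution n lost reserve → Spec_solution n lost reserve (solution n lost reserve)

-- ===== LEMMAS AND PROOFS =====

-- pending pre-removal: when the carry is a reserve student p, A has already removed p+1 (if lost)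
def gymPend (L : PySem.Set Int) (carry : Option (Int × Bool)) : Int :=
  match carry with
  | some (p, false) => if p + 1 ∈ L then 1 else 0
  | _ => 0

lemma length_discard_of_mem {s : PySem.Set Int} {x : Int} (hnd : s.Nodup) (hx : x ∈ s) :
    ((PySem.Set.discard s x).length : Int) = (s.length : Int) - 1 := by
  have h : PySem.Set.discard s x = s.erase x := by
    show List.filter (fun y => !y == x) s = s.erase x
    rw [hnd.erase_eq_filter]
    apply List.filter_congr
    intro y _
    simp [bne]
  rw [h]
  have h2 := List.length_erase_of_mem hx
  have h3 : 0 < s.length := List.length_pos_of_mem hx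
  omega

-- Main invariant-carrying induction over the (strictly increasing) union list:
-- A's fold (fused over the union, acting only on reserve students) loses exactly
-- as many lost-set elements as B's match counter gains, up to the pending pre-removal.
lemma gym_main (L R : PySem.Set Int) (hdisj : ∀ x, x ∈ L → x ∉ R) :
    ∀ (u : List Int), ∀ (s : PySem.Set Int) (c : Int) (carry : Option (Int × Bool)) (last : Option Int),
    u.Pairwise (· < ·) →
    (∀ x ∈ u, x ∈ L ∨ x ∈ R) →
    (∀ x ∈ s, x ∈ L) →
    s.Nodup →
    (∀ x ∈ s, x ∈ u ∨ ∃ p, last = some p ∧ x ≤ p) →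
    (∀ p, last = some p → ∀ x ∈ u, p < x) →
    (∀ x ∈ u, (x ∈ s ↔ (x ∈ L ∧ ∀ p, carry = some (p, false) → x ≠ p + 1))) →
    (∀ p, carry = some (p, true) → last = some p ∧ p ∈ L ∧ p ∈ s) →
    (∀ p, carry = some (p, false) → last = some p ∧ p ∈ R) →
    (carry = none → ∀ p, last = some p → p ∉ s) →
    (∀ x ∈ L, x ∈ u ∨ ∃ p, last = some p ∧ x ≤ p) →
    ((s.length : Int) = (L.length : Int) - c - gymPend L carry) →
    ((u.foldl (fun s v => if PySem.Set.contains R v then gymStepA s v else s) s).length : Int)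
      = (L.length : Int) - (u.foldl (gymStepB L) (c, carry)).1 := by
  intro u
  induction u with
  | nil =>
    intro s c carry last _ _ _ _ _ _ _ _ hcF _ hLu hlen
    simp only [List.foldl_nil]
    have hpend : gymPend L carry = 0 := by
      rcases carry with _ | ⟨p, t⟩
      · rfl
      · cases t
        · simp only [gymPend]
          by_cases hpl : p + 1 ∈ L
          · rcases hLu (p + 1) hpl with h | ⟨q, hq, hle⟩
            · simp at h
            · rcases hcF p rfl with ⟨hl, _⟩
              rw [hl] at hq; injection hq with hq; omega
          · simp [hpl]
        · rfl
    omega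
  | cons v u' ih =>
    intro s c carry last hu hULR hsL hsnd hproc hlt hmem hcT hcF hnone hLu hlen
    rw [List.pairwise_cons] at hu
    obtain ⟨hvlt, hu'⟩ := hu
    have hvmem : v ∈ v :: u' := List.mem_cons_self ..
    have hqltv : ∀ q, last = some q → q < v := fun q hq => hlt q hq v hvmem
    by_cases hvL : v ∈ L
    · -- v is a lost student: A's loop skips it
      have hvR : v ∉ R := hdisj v hvL
      have hstep : (if PySem.Set.contains R v = true then gymStepA s v else s) = s := by
        simp [hvR]
      by_cases hmatch : carry = some (v - 1, false)
      · -- B matches v with the reserve student v-1; A had already removed v from the set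
        subst hmatch
        have hBs : gymStepB L (c, some (v - 1, false)) v = (c + 1, none) := by
          simp [gymStepB, hvL]
        have hvns : v ∉ s := by
          intro hvs
          exact ((hmem v hvmem).mp hvs).2 (v - 1) rfl (by omega)
        have hlastp : last = some (v - 1) := (hcF (v - 1) rfl).1
        rw [List.foldl_cons, List.foldl_cons, hstep, hBs]
        refine ih s (c + 1) none (some v) hu' (fun x hx => hULR x (List.mem_cons_of_mem _ hx))
          hsL hsnd ?_ ?_ ?_ ?_ ?_ ?_ ?_ ?_
        · intro x hx
          rcases hproc x hx with h | ⟨q, hq, hle⟩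
          · rcases List.mem_cons.mp h with rfl | h
            · exact absurd hx hvns
            · exact Or.inl h
          · rw [hlastp] at hq; injection hq with hq
            exact Or.inr ⟨v, rfl, by omega⟩
        · intro q hq x hx; injection hq with hq; subst hq; exact hvlt x hx
        · intro x hx
          have h := hmem x (List.mem_cons_of_mem _ hx)
          have hxv : v < x := hvlt x hx
          have h2 : x ∈ s ↔ x ∈ L := by
            constructor
            · exact fun hh => (h.mp hh).1
            · intro hxL
              refine h.mpr ⟨hxL, ?_⟩
              intro q hq hxq
              injection hq with hq2
              have h1 : v - 1 = q := congrArg Prod.fst hq2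
              omega
          rw [h2]
          constructor
          · exact fun hh => ⟨hh, fun q hq => nomatch hq⟩
          · exact fun hh => hh.1
        · intro q hq; exact nomatch hq
        · intro q hq; exact nomatch hq
        · intro _ q hq; injection hq with hq; subst hq; exact hvns
        · intro x hxL
          rcases hLu x hxL with h | ⟨q, hq, hle⟩
          · rcases List.mem_cons.mp h with rfl | h
            · exact Or.inr ⟨x, rfl, le_refl x⟩
            · exact Or.inl h
          · rw [hlastp] at hq; injection hq with hq
            exact Or.inr ⟨v, rfl, by omega⟩
        · have hpend : gymPend L (some (v - 1, false)) = 1 := by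
            simp only [gymPend]
            have hpv : v - 1 + 1 = v := by omega
            rw [hpv, if_pos hvL]
          have h0 : gymPend L none = 0 := rfl
          rw [hpend] at hlen
          omega
      · -- B carries v as an unmatched lost student; A's set is unchanged
        have hBs : gymStepB L (c, carry) v = (c, some (v, true)) := by
          rcases carry with _ | ⟨p, t⟩
          · simp [gymStepB, hvL]
          · cases t
            · have hp : ¬ p = v - 1 := fun h => hmatch (by rw [h])
              simp [gymStepB, hvL, hp]
            · simp [gymStepB, hvL]
        have hvs : v ∈ s := by
          refine (hmem v hvmem).mpr ⟨hvL, ?_⟩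
          intro q hq hvq
          have hq1 : q = v - 1 := by omega
          exact hmatch (by rw [hq, hq1])
        have hpend0 : gymPend L carry = 0 := by
          rcases carry with _ | ⟨p, t⟩
          · rfl
          · cases t
            · simp only [gymPend]
              rw [if_neg]
              intro hp1L
              have hlastp : last = some p := (hcF p rfl).1
              have hpv : p < v := hqltv p hlastp
              rcases hLu (p + 1) hp1L with h | ⟨q, hq, hle⟩
              · rcases List.mem_cons.mp h with h | h
                · have hq1 : p = v - 1 := by omega
                  exact hmatch (by rw [hq1])
                · have := hvlt _ h; omega
              · rw [hlastp] at hq; injection hq with hq; omega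
            · rfl
        rw [List.foldl_cons, List.foldl_cons, hstep, hBs]
        refine ih s c (some (v, true)) (some v) hu' (fun x hx => hULR x (List.mem_cons_of_mem _ hx))
          hsL hsnd ?_ ?_ ?_ ?_ ?_ ?_ ?_ ?_
        · intro x hx
          rcases hproc x hx with h | ⟨q, hq, hle⟩
          · rcases List.mem_cons.mp h with rfl | h
            · exact Or.inr ⟨x, rfl, le_refl x⟩
            · exact Or.inl h
          · exact Or.inr ⟨v, rfl, by have := hqltv q hq; omega⟩
        · intro q hq x hx; injection hq with hq; subst hq; exact hvlt x hx
        · intro x hx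
          have h := hmem x (List.mem_cons_of_mem _ hx)
          have hxv : v < x := hvlt x hx
          have h2 : x ∈ s ↔ x ∈ L := by
            constructor
            · exact fun hh => (h.mp hh).1
            · intro hxL
              refine h.mpr ⟨hxL, ?_⟩
              intro q hq hxq
              have hlastq : last = some q := (hcF q hq).1
              have := hqltv q hlastq
              omega
          rw [h2]
          constructor
          · intro hh
            refine ⟨hh, ?_⟩
            intro q hq
            injection hq with hq2
            exact absurd (congrArg Prod.snd hq2) (by simp)
          · exact fun hh => hh.1
        · intro q hq
          injection hq with hq2
          have h1 : v = q := congrArg Prod.fst hq2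
          subst h1
          exact ⟨rfl, hvL, hvs⟩
        · intro q hq
          injection hq with hq2
          exact absurd (congrArg Prod.snd hq2) (by simp)
        · intro h; exact nomatch h
        · intro x hxL
          rcases hLu x hxL with h | ⟨q, hq, hle⟩
          · rcases List.mem_cons.mp h with rfl | h
            · exact Or.inr ⟨x, rfl, le_refl x⟩
            · exact Or.inl h
          · exact Or.inr ⟨v, rfl, by have := hqltv q hq; omega⟩
        · have h0 : gymPend L (some (v, true)) = 0 := rfl
          rw [hpend0] at hlen
          omega
    · -- v is a reserve student: A runs its branch, B compares against the carry
      have hvR : v ∈ R := (hULR v hvmem).resolve_left hvL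
      have hvns : v ∉ s := fun h => hvL (hsL v h)
      have hstep : (if PySem.Set.contains R v = true then gymStepA s v else s) = gymStepA s v := by
        simp [hvR]
      have hpend0 : gymPend L carry = 0 := by
        rcases carry with _ | ⟨p, t⟩
        · rfl
        · cases t
          · simp only [gymPend]
            rw [if_neg]
            intro hp1L
            have hlastp : last = some p := (hcF p rfl).1
            have hpv : p < v := hqltv p hlastp
            rcases hLu (p + 1) hp1L with h | ⟨q, hq, hle⟩
            · rcases List.mem_cons.mp h with h | h
              · exact hvL (h ▸ hp1L)
              · have := hvlt _ h; omega
            · rw [hlastp] at hq; injection hq with hq; omega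
          · rfl
      by_cases hc1m : v - 1 ∈ s
      · -- A removes v-1; B matches the carried lost student v-1 with v
        have hcarry : carry = some (v - 1, true) := by
          have hv1L : v - 1 ∈ L := hsL _ hc1m
          have hlast : ∃ q, last = some q ∧ v - 1 ≤ q := by
            rcases hproc _ hc1m with h | h
            · rcases List.mem_cons.mp h with h | h
              · omega
              · have := hvlt _ h; omega
            · exact h
          obtain ⟨q, hq, hle⟩ := hlast
          have hqv : q < v := hqltv q hq
          have hq1 : q = v - 1 := by omega
          subst hq1
          rcases carry with _ | ⟨p, t⟩
          · exact absurd hc1m (hnone rfl _ hq)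
          · cases t
            · rcases hcF p rfl with ⟨hl, hpR⟩
              rw [hl] at hq; injection hq with hq; subst hq
              exact absurd hpR (hdisj _ hv1L)
            · rcases hcT p rfl with ⟨hl, _, _⟩
              rw [hl] at hq; injection hq with hq; subst hq
              rfl
        subst hcarry
        have hsA : gymStepA s v = PySem.Set.discard s (v - 1) := by
          simp [gymStepA, hc1m]
        have hBs : gymStepB L (c, some (v - 1, true)) v = (c + 1, none) := by
          simp [gymStepB, hvL]
        rw [List.foldl_cons, List.foldl_cons, hstep, hsA, hBs]
        refine ih (PySem.Set.discard s (v - 1)) (c + 1) none (some v) hu'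
          (fun x hx => hULR x (List.mem_cons_of_mem _ hx))
          (fun x hx => hsL x ((PySem.Set.mem_discard s (v - 1) x).mp hx).1)
          (PySem.Set.nodup_discard s (v - 1) hsnd) ?_ ?_ ?_ ?_ ?_ ?_ ?_ ?_
        · intro x hx
          obtain ⟨hxs, hxne⟩ := (PySem.Set.mem_discard s (v - 1) x).mp hx
          rcases hproc x hxs with h | ⟨q, hq, hle⟩
          · rcases List.mem_cons.mp h with rfl | h
            · exact absurd hxs hvns
            · exact Or.inl h
          · exact Or.inr ⟨v, rfl, by have := hqltv q hq; omega⟩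
        · intro q hq x hx; injection hq with hq; subst hq; exact hvlt x hx
        · intro x hx
          have h := hmem x (List.mem_cons_of_mem _ hx)
          have hxv : v < x := hvlt x hx
          rw [PySem.Set.mem_discard]
          constructor
          · intro hh
            exact ⟨(h.mp hh.1).1, fun q hq => nomatch hq⟩
          · intro ⟨hxL, _⟩
            refine ⟨h.mpr ⟨hxL, ?_⟩, by omega⟩
            intro q hq
            injection hq with hq2
            exact absurd (congrArg Prod.snd hq2) (by simp)
        · intro q hq; exact nomatch hq
        · intro q hq; exact nomatch hq
        · intro _ q hq
          injection hq with hq; subst hq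
          intro h
          exact hvns ((PySem.Set.mem_discard s (v - 1) _).mp h).1
        · intro x hxL
          rcases hLu x hxL with h | ⟨q, hq, hle⟩
          · rcases List.mem_cons.mp h with rfl | h
            · exact absurd hxL hvL
            · exact Or.inl h
          · exact Or.inr ⟨v, rfl, by have := hqltv q hq; omega⟩
        · have h0 : gymPend L none = 0 := rfl
          have hd := length_discard_of_mem hsnd hc1m
          rw [hpend0] at hlen
          omega
      · -- A may remove v+1 (iff v+1 is a lost student); B carries v as an unmatched reserve student
        have hkey2 : v + 1 ∈ s ↔ v + 1 ∈ L := by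
          constructor
          · exact fun h => hsL _ h
          · intro hv1L
            have hv1u : v + 1 ∈ u' := by
              rcases hLu (v + 1) hv1L with h | ⟨q, hq, hle⟩
              · rcases List.mem_cons.mp h with h | h
                · omega
                · exact h
              · have := hqltv q hq; omega
            refine (hmem (v + 1) (List.mem_cons_of_mem _ hv1u)).mpr ⟨hv1L, ?_⟩
            intro q hq hv1q
            have hlastq : last = some q := (hcF q hq).1
            have := hqltv q hlastq
            omega
        have hBs : gymStepB L (c, carry) v = (c, some (v, false)) := by
          rcases carry with _ | ⟨p, t⟩
          · simp [gymStepB, hvL]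
          · cases t
            · simp [gymStepB, hvL]
            · have hp : ¬ p = v - 1 := by
                intro h
                subst h
                exact hc1m (hcT (v - 1) rfl).2.2
              simp [gymStepB, hvL, hp]
        by_cases hv1L : v + 1 ∈ L
        · -- v+1 is lost: A pre-removes it; B will match it at the next union element
          have hv1s : v + 1 ∈ s := hkey2.mpr hv1L
          have hsA : gymStepA s v = PySem.Set.discard s (v + 1) := by
            simp [gymStepA, hc1m, hv1s]
          rw [List.foldl_cons, List.foldl_cons, hstep, hsA, hBs]
          refine ih (PySem.Set.discard s (v + 1)) c (some (v, false)) (some v) hu'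
            (fun x hx => hULR x (List.mem_cons_of_mem _ hx))
            (fun x hx => hsL x ((PySem.Set.mem_discard s (v + 1) x).mp hx).1)
            (PySem.Set.nodup_discard s (v + 1) hsnd) ?_ ?_ ?_ ?_ ?_ ?_ ?_ ?_
          · intro x hx
            obtain ⟨hxs, hxne⟩ := (PySem.Set.mem_discard s (v + 1) x).mp hx
            rcases hproc x hxs with h | ⟨q, hq, hle⟩
            · rcases List.mem_cons.mp h with rfl | h
              · exact absurd hxs hvns
              · exact Or.inl h
            · exact Or.inr ⟨v, rfl, by have := hqltv q hq; omega⟩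
          · intro q hq x hx; injection hq with hq; subst hq; exact hvlt x hx
          · intro x hx
            have h := hmem x (List.mem_cons_of_mem _ hx)
            have hxv : v < x := hvlt x hx
            rw [PySem.Set.mem_discard]
            constructor
            · intro hh
              refine ⟨(h.mp hh.1).1, ?_⟩
              intro q hq
              injection hq with hq2
              have h1 : v = q := congrArg Prod.fst hq2
              subst h1
              exact hh.2
            · intro ⟨hxL, hcond⟩
              refine ⟨h.mpr ⟨hxL, ?_⟩, hcond v rfl⟩
              intro q hq hxq
              have hlastq : last = some q := (hcF q hq).1
              have := hqltv q hlastq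
              omega
          · intro q hq
            injection hq with hq2
            exact absurd (congrArg Prod.snd hq2) (by simp)
          · intro q hq
            injection hq with hq2
            have h1 : v = q := congrArg Prod.fst hq2
            subst h1
            exact ⟨rfl, hvR⟩
          · intro h; exact nomatch h
          · intro x hxL
            rcases hLu x hxL with h | ⟨q, hq, hle⟩
            · rcases List.mem_cons.mp h with rfl | h
              · exact absurd hxL hvL
              · exact Or.inl h
            · exact Or.inr ⟨v, rfl, by have := hqltv q hq; omega⟩
          · have hpend : gymPend L (some (v, false)) = 1 := by
              simp only [gymPend]
              rw [if_pos hv1L]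
            have hd := length_discard_of_mem hsnd hv1s
            rw [hpend0] at hlen
            omega
        · -- v+1 is not lost: nothing changes on either side
          have hv1ns : v + 1 ∉ s := fun h => hv1L (hkey2.mp h)
          have hsA : gymStepA s v = s := by
            simp [gymStepA, hc1m, hv1ns]
          rw [List.foldl_cons, List.foldl_cons, hstep, hsA, hBs]
          refine ih s c (some (v, false)) (some v) hu'
            (fun x hx => hULR x (List.mem_cons_of_mem _ hx)) hsL hsnd ?_ ?_ ?_ ?_ ?_ ?_ ?_ ?_
          · intro x hx
            rcases hproc x hx with h | ⟨q, hq, hle⟩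
            · rcases List.mem_cons.mp h with rfl | h
              · exact absurd hx hvns
              · exact Or.inl h
            · exact Or.inr ⟨v, rfl, by have := hqltv q hq; omega⟩
          · intro q hq x hx; injection hq with hq; subst hq; exact hvlt x hx
          · intro x hx
            have h := hmem x (List.mem_cons_of_mem _ hx)
            have hxv : v < x := hvlt x hx
            constructor
            · intro hh
              refine ⟨(h.mp hh).1, ?_⟩
              intro q hq hxq
              injection hq with hq2
              have h1 : v = q := congrArg Prod.fst hq2
              subst h1
              exact hv1ns (hxq ▸ hh)
            · intro ⟨hxL, _⟩
              refine h.mpr ⟨hxL, ?_⟩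
              intro q hq hxq
              have hlastq : last = some q := (hcF q hq).1
              have := hqltv q hlastq
              omega
          · intro q hq
            injection hq with hq2
            exact absurd (congrArg Prod.snd hq2) (by simp)
          · intro q hq
            injection hq with hq2
            have h1 : v = q := congrArg Prod.fst hq2
            subst h1
            exact ⟨rfl, hvR⟩
          · intro h; exact nomatch h
          · intro x hxL
            rcases hLu x hxL with h | ⟨q, hq, hle⟩
            · rcases List.mem_cons.mp h with rfl | h
              · exact absurd hxL hvL
              · exact Or.inl h
            · exact Or.inr ⟨v, rfl, by have := hqltv q hq; omega⟩
          · have hpend : gymPend L (some (v, false)) = 0 := by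
              simp only [gymPend]
              rw [if_neg hv1L]
            rw [hpend0] at hlen
            rw [hpend]
            omega

theorem solution_eq_alt (n : Int) (lost : List Int) (reserve : List Int) :
    solution n lost reserve = solution_alt n lost reserve := by
  simp only [solution, solution_alt]
  set L : PySem.Set Int := PySem.Set.diff (PySem.Set.ofList lost) (PySem.Set.ofList reserve) with hL
  set R : PySem.Set Int := PySem.Set.diff (PySem.Set.ofList reserve) (PySem.Set.ofList lost) with hR
  have hLnd : L.Nodup := PySem.Set.nodup_diff _ _ (PySem.Set.nodup_ofList _)
  have hRnd : R.Nodup := PySem.Set.nodup_diff _ _ (PySem.Set.nodup_ofList _)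
  have hdisj : ∀ x, x ∈ L → x ∉ R := by
    intro x hxL hxR
    rw [hL, PySem.Set.mem_diff] at hxL
    rw [hR, PySem.Set.mem_diff] at hxR
    exact hxL.2 hxR.1
  have hUnd : (PySem.Set.union L R).Nodup := PySem.Set.nodup_union L R hLnd
  set sU : List Int := PySem.List.sorted (PySem.Set.union L R) (fun x => x) false with hsU
  have hsUnd : sU.Nodup := (PySem.List.sorted_perm (PySem.Set.union L R) (fun x => x) false).nodup_iff.mpr hUnd
  have hsUlt : sU.Pairwise (· < ·) := by
    have hle : sU.Pairwise (· ≤ ·) := PySem.List.sorted_pairwise (PySem.Set.union L R) (fun x => x)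
    exact (hle.and hsUnd).imp fun h => lt_of_le_of_ne h.1 h.2
  have hmemU : ∀ x, x ∈ sU ↔ (x ∈ L ∨ x ∈ R) := by
    intro x
    rw [hsU, PySem.List.mem_sorted, PySem.Set.mem_union]
  have hfilt : PySem.List.sorted R (fun x => x) false = sU.filter (fun v => PySem.Set.contains R v) := by
    apply PySem.List.sorted_eq_of_perm_of_pairwise_lt
    · rw [List.perm_ext_iff_of_nodup (hsUnd.filter _) hRnd]
      intro a
      rw [List.mem_filter, PySem.Set.contains_iff, hmemU a]
      constructor
      · exact fun h => h.2
      · exact fun h => ⟨Or.inr h, h⟩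
    · exact hsUlt.filter _
  have hmain := gym_main L R hdisj sU L 0 none none hsUlt
    (fun x hx => (hmemU x).mp hx)
    (fun x hx => hx) hLnd
    (fun x hx => Or.inl ((hmemU x).mpr (Or.inl hx)))
    (fun p hp => nomatch hp)
    (fun x _ => by
      constructor
      · exact fun h => ⟨h, fun q hq => nomatch hq⟩
      · exact fun h => h.1)
    (fun p hp => nomatch hp)
    (fun p hp => nomatch hp)
    (fun _ p hp => nomatch hp)
    (fun x hx => Or.inl ((hmemU x).mpr (Or.inl hx)))
    (by have h0 : gymPend L none = 0 := rfl; rw [h0]; ring)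
  rw [PySem.List.foldl_if_eq_foldl_filter] at hmain
  rw [← hfilt] at hmain
  simp only [PySem.Set.len]
  omega

-- ===== VERDICT (by name: the statement is the Claim_ definition above) =====
theorem solution_spec : Claim_equal_solution := by
  intro n lost reserve _
  unfold Spec_solution
  exact solution_eq_alt n lost reserve
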